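-- pv_equiv track=rewrite | github.com/bhavaygg/InSTAnT | PP/proximal_pairs.py | anu_count_elements
-- ===== SOURCE A (Python) =====
-- def anu_count_elements(pairs, pairs_all_cat):
--     counter = {}
--     spatial_cat_0,spatial_cat_1,spatial_cat_2,spatial_cat_3 = {},{},{},{}
--     pairs_isinnernuc, pairs_isperinuc, pairs_iscyto, pairs_iscellperi = pairs_all_cat[0],pairs_all_cat[1],pairs_all_cat[2],pairs_all_cat[3]
--
--     for i,elem in enumerate(pairs):
--
--         counter[elem] = counter.get(elem, 0) + 1
--         spatial_cat_0[elem] = spatial_cat_0.get(elem, 0) + pairs_isinnernuc[i]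
--         spatial_cat_1[elem] = spatial_cat_1.get(elem, 0) + pairs_isperinuc[i]
--         spatial_cat_2[elem] = spatial_cat_2.get(elem, 0) + pairs_iscyto[i]
--         spatial_cat_3[elem] = spatial_cat_3.get(elem, 0) + pairs_iscellperi[i]
--
--     return counter, spatial_cat_0,spatial_cat_1,spatial_cat_2,spatial_cat_3#,spatial_cat_4
-- ===== SOURCE B (Python) =====
-- def anu_count_elements(pairs, pairs_all_cat):
--     cat0, cat1, cat2, cat3 = pairs_all_cat[0], pairs_all_cat[1], pairs_all_cat[2], pairs_all_cat[3]
--     keys = list(dict.fromkeys(pairs))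
--
--     def agg(vals):
--         return {k: sum(v for p, v in zip(pairs, vals) if p == k) for k in keys}
--
--     counter = {k: pairs.count(k) for k in keys}
--     return counter, agg(cat0), agg(cat1), agg(cat2), agg(cat3)
-- ===== Notes on version B (the rewrite author's own statement) =====
-- stated objective: alternative
-- what changed: B computes the distinct keys once and then builds each of the five result dicts directly by a comprehension over those keys (pairs.count / a filtered zip-sum per key), instead of A's single pass updating five running dicts per element.
import Mathlib
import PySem

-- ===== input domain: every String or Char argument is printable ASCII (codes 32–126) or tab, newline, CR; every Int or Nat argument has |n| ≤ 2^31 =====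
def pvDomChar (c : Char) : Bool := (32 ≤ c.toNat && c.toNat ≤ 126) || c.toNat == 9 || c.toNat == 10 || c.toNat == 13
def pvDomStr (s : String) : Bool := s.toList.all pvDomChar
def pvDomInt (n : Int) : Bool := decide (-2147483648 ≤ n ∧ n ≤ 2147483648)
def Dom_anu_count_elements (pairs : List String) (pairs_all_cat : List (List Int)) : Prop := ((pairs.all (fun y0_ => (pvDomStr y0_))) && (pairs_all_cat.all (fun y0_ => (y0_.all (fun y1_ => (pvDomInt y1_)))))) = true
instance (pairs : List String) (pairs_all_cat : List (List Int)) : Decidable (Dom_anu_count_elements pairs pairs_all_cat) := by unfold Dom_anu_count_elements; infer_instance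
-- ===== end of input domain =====

-- B computes the distinct keys once (dict.fromkeys) and builds each of the five result dicts
-- directly by a comprehension over those keys (count / filtered zip-sum per key), instead of
-- A's single pass updating five running dicts; alternative decomposition, not claimed faster.

-- ===== PORT A =====
def anu_count_elements (pairs : List String) (pairs_all_cat : List (List Int)) : (List (String × Int)) × (List (String × Int)) × (List (String × Int)) × (List (String × Int)) × (List (String × Int)) :=
  let pairs_isinnernuc := PySem.List.pyGetD pairs_all_cat 0 []
  let pairs_isperinuc  := PySem.List.pyGetD pairs_all_cat 1 []
  let pairs_iscyto     := PySem.List.pyGetD pairs_all_cat 2 []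
  let pairs_iscellperi := PySem.List.pyGetD pairs_all_cat 3 []
  -- the loop: five running dicts updated per element (all indexing is in range on Pre_)
  let st := (PySem.List.enumerate pairs 0).foldl
    (fun (st : PySem.Dict String Int × PySem.Dict String Int × PySem.Dict String Int × PySem.Dict String Int × PySem.Dict String Int) p =>
      (st.1.insert p.2 (st.1.getD p.2 0 + 1),
       st.2.1.insert p.2 (st.2.1.getD p.2 0 + PySem.List.pyGetD pairs_isinnernuc p.1 0),
       st.2.2.1.insert p.2 (st.2.2.1.getD p.2 0 + PySem.List.pyGetD pairs_isperinuc p.1 0),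
       st.2.2.2.1.insert p.2 (st.2.2.2.1.getD p.2 0 + PySem.List.pyGetD pairs_iscyto p.1 0),
       st.2.2.2.2.insert p.2 (st.2.2.2.2.getD p.2 0 + PySem.List.pyGetD pairs_iscellperi p.1 0)))
    (PySem.Dict.empty, PySem.Dict.empty, PySem.Dict.empty, PySem.Dict.empty, PySem.Dict.empty)
  (st.1.items, st.2.1.items, st.2.2.1.items, st.2.2.2.1.items, st.2.2.2.2.items)

-- ===== PORT B =====
def anu_count_elements_alt (pairs : List String) (pairs_all_cat : List (List Int)) : (List (String × Int)) × (List (String × Int)) × (List (String × Int)) × (List (String × Int)) × (List (String × Int)) :=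
  let cat0 := PySem.List.pyGetD pairs_all_cat 0 []
  let cat1 := PySem.List.pyGetD pairs_all_cat 1 []
  let cat2 := PySem.List.pyGetD pairs_all_cat 2 []
  let cat3 := PySem.List.pyGetD pairs_all_cat 3 []
  -- keys = list(dict.fromkeys(pairs))
  let keys := PySem.List.dedup pairs
  -- agg(vals) = {k: sum(v for p, v in zip(pairs, vals) if p == k) for k in keys}
  let agg := fun (vals : List Int) =>
    keys.map (fun k => (k, (((pairs.zip vals).filter (fun q => q.1 == k)).map (·.2)).sum))
  (keys.map (fun k => (k, (PySem.List.count pairs k : Int))), agg cat0, agg cat1, agg cat2, agg cat3)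

-- ===== PRECONDITION & SPEC =====
-- Pre_ excludes exactly the inputs where the Python A raises IndexError: fewer than four
-- category lists, or one of the first four category lists shorter than pairs.
def Pre_anu_count_elements (pairs : List String) (pairs_all_cat : List (List Int)) : Prop :=
  4 ≤ pairs_all_cat.length ∧ ∀ l ∈ pairs_all_cat.take 4, pairs.length ≤ l.length
instance (pairs : List String) (pairs_all_cat : List (List Int)) : Decidable (Pre_anu_count_elements pairs pairs_all_cat) := by unfold Pre_anu_count_elements; infer_instance

def pvWitness_anu_count_elements : List String × List (List Int) :=
  (["a", "b", "a"], [[1, 0, 1], [0, 1, 0], [2, 2, 2], [0, 0, 1]])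

def Spec_anu_count_elements (pairs : List String) (pairs_all_cat : List (List Int)) (out : (List (String × Int)) × (List (String × Int)) × (List (String × Int)) × (List (String × Int)) × (List (String × Int))) : Prop := out = anu_count_elements_alt pairs pairs_all_cat
instance (pairs : List String) (pairs_all_cat : List (List Int)) (out : (List (String × Int)) × (List (String × Int)) × (List (String × Int)) × (List (String × Int)) × (List (String × Int))) : Decidable (Spec_anu_count_elements pairs pairs_all_cat out) := by
  unfold Spec_anu_count_elements
  haveI h2 : DecidableEq ((List (String × Int)) × (List (String × Int))) := instDecidableEqProd
  haveI h3 : DecidableEq ((List (String × Int)) × (List (String × Int)) × (List (String × Int))) := instDecidableEqProd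
  haveI h4 : DecidableEq ((List (String × Int)) × (List (String × Int)) × (List (String × Int)) × (List (String × Int))) := instDecidableEqProd
  haveI h5 : DecidableEq ((List (String × Int)) × (List (String × Int)) × (List (String × Int)) × (List (String × Int)) × (List (String × Int))) := instDecidableEqProd
  exact h5 _ _

-- ===== CLAIM (what is proved, stated in full; the proofs are below) =====
def Claim_equal_anu_count_elements : Prop := ∀ (pairs : List String) (pairs_all_cat : List (List Int)), Dom_anu_count_elements pairs pairs_all_cat → Pre_anu_count_elements pairs pairs_all_cat → Spec_anu_count_elements pairs pairs_all_cat (anu_count_elements pairs pairs_all_cat)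

-- ===== LEMMAS AND PROOFS =====

-- a foldl over a 5-tuple of independently updated components splits into five foldls
theorem pvFoldlProd5 {α β1 β2 β3 β4 β5 : Type} (f1 : β1 → α → β1) (f2 : β2 → α → β2)
    (f3 : β3 → α → β3) (f4 : β4 → α → β4) (f5 : β5 → α → β5) (l : List α)
    (s : β1 × β2 × β3 × β4 × β5) :
    l.foldl (fun st p => (f1 st.1 p, f2 st.2.1 p, f3 st.2.2.1 p, f4 st.2.2.2.1 p, f5 st.2.2.2.2 p)) s
      = (l.foldl f1 s.1, l.foldl f2 s.2.1, l.foldl f3 s.2.2.1, l.foldl f4 s.2.2.2.1, l.foldl f5 s.2.2.2.2) := by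
  induction l generalizing s with
  | nil => rfl
  | cons h t ih => simpa using ih _

-- the shape of each of A's five dict-building loops
def pvFoldA (g : Int → Int) (l : List (Int × String)) (d : PySem.Dict String Int) : PySem.Dict String Int :=
  l.foldl (fun d p => d.insert p.2 (d.getD p.2 0 + g p.1)) d

theorem getD_pvFoldA (g : Int → Int) (l : List (Int × String)) (d : PySem.Dict String Int) (c : String) :
    (pvFoldA g l d).getD c 0 = d.getD c 0 + ((l.filter (fun p => p.2 == c)).map (fun p => g p.1)).sum := by
  induction l generalizing d with
  | nil => simp [pvFoldA]
  | cons h t ih =>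
    simp only [pvFoldA, List.foldl_cons] at *
    rw [ih, PySem.Dict.getD_insert]
    by_cases hc : h.2 = c
    · subst hc
      simp
      ring
    · rw [if_neg (fun h' => hc h'.symm)]
      simp [hc]

theorem keys_pvFoldA (g : Int → Int) (l : List (Int × String)) (d : PySem.Dict String Int) :
    (pvFoldA g l d).keys = PySem.Set.update d.keys (l.map (·.2)) :=
  PySem.Dict.keys_foldl_insert_key l (·.2) (fun d p => d.getD p.2 0 + g p.1) d

theorem nodup_keys_pvFoldA (g : Int → Int) (l : List (Int × String)) :
    (pvFoldA g l PySem.Dict.empty).keys.Nodup :=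
  PySem.Dict.nodup_keys_foldl_insert_key l (·.2) _ _ (by simp [PySem.Dict.keys_empty])

-- items of one A-side dict, as a map over the deduplicated keys
theorem items_pvFoldA (g : Int → Int) (l : List (Int × String)) :
    (pvFoldA g l PySem.Dict.empty).items
      = (PySem.Set.update ([] : List String) (l.map (·.2))).map
          (fun c => (c, ((l.filter (fun p => p.2 == c)).map (fun p => g p.1)).sum)) := by
  rw [PySem.Dict.items_eq_map_keys _ (nodup_keys_pvFoldA g l) 0, keys_pvFoldA]
  simp only [PySem.Dict.keys_empty]
  exact List.map_congr_left (fun c _ => by rw [getD_pvFoldA]; simp)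

-- dict.fromkeys order = the key set A's inserts accumulate
theorem pvDedup_eq_update (pairs : List String) :
    PySem.List.dedup pairs = PySem.Set.update ([] : List String) pairs := by
  simp [PySem.List.dedup_eq_ofList]
  rfl

-- the number of enumerated elements with key c is the count of c
theorem pvFilterCount (c : String) (xs : List String) (n : Int) :
    ((PySem.List.enumerate xs n).filter (fun p => p.2 == c)).length = xs.count c := by
  induction xs generalizing n with
  | nil => simp [PySem.List.enumerate_nil]
  | cons x t ih =>
    rw [PySem.List.enumerate_cons]
    by_cases hc : x = c
    · subst hc
      simp [List.count_cons, ih]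
    · simp [hc, ih]

-- the 1-sum over the elements with key c is the count of c
theorem pvCountSum (c : String) (xs : List String) (n : Int) :
    ((((PySem.List.enumerate xs n).filter (fun p => p.2 == c)).map (fun _ => (1 : Int))).sum)
      = (xs.count c : Int) := by
  simp [pvFilterCount]

-- indexing by the enumerated positions equals zipping, when vals is long enough
theorem pvIdxZip (c : String) (xs : List String) (vals : List Int) (n : Nat)
    (h : xs.length + n ≤ vals.length) :
    ((PySem.List.enumerate xs (n : Int)).filter (fun p => p.2 == c)).map
        (fun p => PySem.List.pyGetD vals p.1 0)
      = ((xs.zip (vals.drop n)).filter (fun q => q.1 == c)).map (·.2) := by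
  induction xs generalizing n with
  | nil => simp [PySem.List.enumerate_nil]
  | cons x t ih =>
    have hn : n < vals.length := by simp at h; omega
    have hdrop : vals.drop n = vals[n] :: vals.drop (n + 1) := List.drop_eq_getElem_cons hn
    have hget : PySem.List.pyGetD vals ((n : Nat) : Int) 0 = vals[n] := by
      rw [PySem.List.pyGetD_natCast]
      exact List.getD_eq_getElem vals 0 hn
    have hstep : ((n : Nat) : Int) + 1 = (((n + 1 : Nat)) : Int) := by push_cast; ring
    have hlen : t.length + (n + 1) ≤ vals.length := by simp at h; omega
    rw [PySem.List.enumerate_cons, hdrop, hstep]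
    by_cases hc : x = c
    · subst hc
      simp only [List.zip_cons_cons, List.filter_cons, beq_self_eq_true, if_pos, List.map_cons]
      rw [ih (n + 1) hlen, hget]
    · simp only [List.zip_cons_cons, List.filter_cons]
      have : (x == c) = false := beq_false_of_ne hc
      rw [this]
      simpa using ih (n + 1) hlen

-- the first four category lists are long enough, under Pre_
theorem pvCatLong (pairs : List String) (cat : List (List Int))
    (hpre : Pre_anu_count_elements pairs cat) (j : Nat) (hj : j < 4) :
    pairs.length ≤ (PySem.List.pyGetD cat (j : Int) []).length := by
  obtain ⟨hlen, hall⟩ := hpre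
  have hjlen : j < cat.length := by omega
  have hget : PySem.List.pyGetD cat (j : Int) [] = cat[j] := by
    rw [PySem.List.pyGetD_natCast]
    exact List.getD_eq_getElem cat [] hjlen
  rw [hget]
  exact hall cat[j] (by
    have : (cat.take 4)[j]'(by simp; omega) = cat[j] := List.getElem_take
    rw [← this]
    exact List.getElem_mem _)

-- one matching component: A's running-sum dict vs B's per-key zip-sum
theorem pvComponentZip (pairs : List String) (vals : List Int)
    (h : pairs.length ≤ vals.length) :
    (pvFoldA (fun i => PySem.List.pyGetD vals i 0) (PySem.List.enumerate pairs 0) PySem.Dict.empty).items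
      = (PySem.List.dedup pairs).map
          (fun k => (k, (((pairs.zip vals).filter (fun q => q.1 == k)).map (·.2)).sum)) := by
  rw [items_pvFoldA, PySem.List.map_snd_enumerate, ← pvDedup_eq_update]
  refine List.map_congr_left (fun c _ => ?_)
  have h0 : pairs.length + 0 ≤ vals.length := by omega
  have := pvIdxZip c pairs vals 0 h0
  simp only [Nat.cast_zero, List.drop_zero] at this
  rw [this]

-- counter component: A's +1 dict vs B's pairs.count per key
theorem pvComponentCount (pairs : List String) :
    (pvFoldA (fun _ => 1) (PySem.List.enumerate pairs 0) PySem.Dict.empty).items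
      = (PySem.List.dedup pairs).map (fun k => (k, (PySem.List.count pairs k : Int))) := by
  rw [items_pvFoldA, PySem.List.map_snd_enumerate, ← pvDedup_eq_update]
  refine List.map_congr_left (fun c _ => ?_)
  rw [pvCountSum c pairs 0]
  simp [PySem.List.count_eq]

-- ===== VERDICT (by name: the statement is the Claim_ definition above) =====
theorem anu_count_elements_spec : Claim_equal_anu_count_elements := by
  intro pairs cat _ hpre
  unfold Spec_anu_count_elements anu_count_elements anu_count_elements_alt
  dsimp only
  rw [pvFoldlProd5
        (fun (d : PySem.Dict String Int) (p : Int × String) => d.insert p.2 (d.getD p.2 0 + 1))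
        (fun (d : PySem.Dict String Int) (p : Int × String) => d.insert p.2 (d.getD p.2 0 + PySem.List.pyGetD (PySem.List.pyGetD cat 0 []) p.1 0))
        (fun (d : PySem.Dict String Int) (p : Int × String) => d.insert p.2 (d.getD p.2 0 + PySem.List.pyGetD (PySem.List.pyGetD cat 1 []) p.1 0))
        (fun (d : PySem.Dict String Int) (p : Int × String) => d.insert p.2 (d.getD p.2 0 + PySem.List.pyGetD (PySem.List.pyGetD cat 2 []) p.1 0))
        (fun (d : PySem.Dict String Int) (p : Int × String) => d.insert p.2 (d.getD p.2 0 + PySem.List.pyGetD (PySem.List.pyGetD cat 3 []) p.1 0))]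
  have h0 := pvCatLong pairs cat hpre 0 (by omega)
  have h1 := pvCatLong pairs cat hpre 1 (by omega)
  have h2 := pvCatLong pairs cat hpre 2 (by omega)
  have h3 := pvCatLong pairs cat hpre 3 (by omega)
  simp only [Nat.cast_zero, Nat.cast_one, Nat.cast_ofNat] at h0 h1 h2 h3
  refine Prod.ext ?_ (Prod.ext ?_ (Prod.ext ?_ (Prod.ext ?_ ?_)))
  · exact pvComponentCount pairs
  · exact pvComponentZip pairs _ h0
  · exact pvComponentZip pairs _ h1
  · exact pvComponentZip pairs _ h2
  · exact pvComponentZip pairs _ h3
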